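-- pv_equiv track=rewrite | github.com/Voravomas/newsmap | crawler/misc/kw_searcher_v2.py | lower_at_start
-- ===== SOURCE A (Python) =====
-- def lower_at_start(text: str) -> str:
--     separators = ["\n", ".", "\""]
--     lower_next = True
--     fin_text = ""
--     for symbol in text:
--         if symbol in separators:
--             lower_next = True
--         if lower_next and symbol.isalpha():
--             fin_text += symbol.lower()
--             lower_next = False
--             continue
--         fin_text += symbol
--     return fin_text
-- ===== SOURCE B (Python) =====
-- def lower_at_start(text: str) -> str:
--     # split into separator-free segments with the separators kept as their
--     # own one-char segments, then lowercase the first letter of each segment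
--     segs = []
--     cur = []
--     for ch in text:
--         if ch in '\n."':
--             segs.append(''.join(cur))
--             segs.append(ch)
--             cur = []
--         else:
--             cur.append(ch)
--     segs.append(''.join(cur))
--     return ''.join(_lower_first_alpha(s) for s in segs)
--
--
-- def _lower_first_alpha(s: str) -> str:
--     for i, ch in enumerate(s):
--         if ch.isalpha():
--             return s[:i] + ch.lower() + s[i + 1:]
--     return s
-- ===== Notes on version B (the rewrite author's own statement) =====
-- stated objective: alternative
-- what changed: Instead of one stateful scan carrying a lower_next flag, B splits the text into separator-delimited segments (separators kept) and lowercases the first alphabetic character of each segment, then joins.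
import Mathlib
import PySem

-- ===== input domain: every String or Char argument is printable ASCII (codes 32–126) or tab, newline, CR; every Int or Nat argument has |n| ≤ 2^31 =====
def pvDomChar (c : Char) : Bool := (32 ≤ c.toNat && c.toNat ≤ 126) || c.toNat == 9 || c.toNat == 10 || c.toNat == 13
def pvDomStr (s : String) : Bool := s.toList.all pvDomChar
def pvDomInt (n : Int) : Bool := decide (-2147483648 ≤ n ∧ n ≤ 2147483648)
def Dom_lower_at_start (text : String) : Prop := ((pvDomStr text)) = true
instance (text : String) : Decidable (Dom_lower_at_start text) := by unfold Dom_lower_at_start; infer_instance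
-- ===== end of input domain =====

-- B lowercases the first letter of each separator-delimited segment instead of carrying a lower_next flag through one stateful scan; same result, proved equivalent on all inputs.

-- ===== PORT A =====
-- one scan with a lower_next flag, as in A's for-loop (state: lower_next, accumulated output)
def pvAGo : Bool → List Char → List Char
  | _, [] => []
  | lowerNext, symbol :: rest =>
    let ln := if symbol = '\n' ∨ symbol = '.' ∨ symbol = '"' then true else lowerNext
    if ln && PySem.Chars.isalpha symbol then
      PySem.Chars.lowerChar symbol :: pvAGo false rest
    else
      symbol :: pvAGo ln rest

def lower_at_start (text : String) : String :=
  String.mk (pvAGo true text.toList)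

-- ===== PORT B =====
-- split keeping separators as their own one-char segments (Source B's first loop)
def pvBSplit (cur : List Char) : List Char → List (List Char)
  | [] => [cur]
  | ch :: rest =>
    if ch = '\n' ∨ ch = '.' ∨ ch = '"' then
      cur :: [ch] :: pvBSplit [] rest
    else
      pvBSplit (cur ++ [ch]) rest

-- lowercase the first alphabetic character of a segment (Source B's _lower_first_alpha)
def pvBLowerFirst : List Char → List Char
  | [] => []
  | ch :: rest =>
    if PySem.Chars.isalpha ch then PySem.Chars.lowerChar ch :: rest
    else ch :: pvBLowerFirst rest

def lower_at_start_alt (text : String) : String :=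
  String.mk (((pvBSplit [] text.toList).map pvBLowerFirst).flatten)

-- ===== PRECONDITION & SPEC =====
def Spec_lower_at_start (text : String) (out : String) : Prop := out = lower_at_start_alt text
instance (text : String) (out : String) : Decidable (Spec_lower_at_start text out) := by unfold Spec_lower_at_start; infer_instance

-- ===== CLAIM (what is proved, stated in full; the proofs are below) =====
def Claim_equal_lower_at_start : Prop := ∀ (text : String), Dom_lower_at_start text → Spec_lower_at_start text (lower_at_start text)

-- ===== LEMMAS AND PROOFS =====
-- proof-side decomposition of pvBSplit: first segment and the remaining segments
def pvFirstSeg : List Char → List Char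
  | [] => []
  | c :: r => if c = '\n' ∨ c = '.' ∨ c = '"' then [] else c :: pvFirstSeg r

def pvRestSegs : List Char → List (List Char)
  | [] => []
  | c :: r => if c = '\n' ∨ c = '.' ∨ c = '"' then [c] :: pvBSplit [] r else pvRestSegs r

lemma pvBSplit_eq : ∀ (l : List Char) (cur : List Char),
    pvBSplit cur l = (cur ++ pvFirstSeg l) :: pvRestSegs l := by
  intro l
  induction l with
  | nil => intro cur; simp [pvBSplit, pvFirstSeg, pvRestSegs]
  | cons c r ih =>
    intro cur
    by_cases h : c = '\n' ∨ c = '.' ∨ c = '"'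
    · simp [pvBSplit, pvFirstSeg, pvRestSegs, h]
    · simp [pvBSplit, pvFirstSeg, pvRestSegs, h, ih]

lemma pvGo_eq : ∀ (l : List Char),
    (pvAGo true l = ((pvBSplit [] l).map pvBLowerFirst).flatten) ∧
    (pvAGo false l = pvFirstSeg l ++ ((pvRestSegs l).map pvBLowerFirst).flatten) := by
  intro l
  induction l with
  | nil => simp [pvAGo, pvBSplit, pvBLowerFirst, pvFirstSeg, pvRestSegs]
  | cons c r ih =>
    obtain ⟨ihT, ihF⟩ := ih
    by_cases h : c = '\n' ∨ c = '.' ∨ c = '"'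
    · have hna : PySem.Chars.isalpha c = false := by
        rcases h with h | h | h <;> subst h <;> decide
      constructor
      · simp [pvAGo, pvBSplit, h, hna, pvBLowerFirst, ihT]
      · simp [pvAGo, pvFirstSeg, pvRestSegs, h, hna, pvBLowerFirst, ihT]
    · have hsplit := pvBSplit_eq r [c]
      by_cases ha : PySem.Chars.isalpha c = true
      · constructor
        · simp [pvAGo, pvBSplit, h, ha, hsplit, pvBLowerFirst, ihF]
        · simp [pvAGo, pvFirstSeg, pvRestSegs, h, ha, ihF]
      · have hT' : pvAGo true r
            = pvBLowerFirst (pvFirstSeg r) ++ ((pvRestSegs r).map pvBLowerFirst).flatten := by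
          rw [ihT, pvBSplit_eq r []]; simp
        constructor
        · simp [pvAGo, pvBSplit, h, ha, hsplit, pvBLowerFirst, hT']
        · simp [pvAGo, pvFirstSeg, pvRestSegs, h, ha, ihF]

-- ===== VERDICT (by name: the statement is the Claim_ definition above) =====
theorem lower_at_start_spec : Claim_equal_lower_at_start := by
  intro text _
  unfold Spec_lower_at_start lower_at_start lower_at_start_alt
  exact congrArg String.mk (pvGo_eq text.toList).1
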